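-- pv_equiv track=rewrite | github.com/HrtBridge/vibeathon-repo | state_engine/engine.py | _candidate_id_fields
-- ===== SOURCE A (Python) =====
-- from typing import Dict, List, Optional, Set, Tuple
--
-- def _candidate_id_fields(rows: List[dict]) -> List[str]:
--     if not rows:
--         return []
--     keys = list(rows[0].keys())
--     # Strong candidates first
--     preferred = []
--     for k in keys:
--         lk = k.lower().strip()
--         if lk in ("unique id", "unique_id", "_id", "id", "uid"):
--             preferred.append(k)
--     # Then anything containing id
--     for k in keys:
--         if k not in preferred and "id" in k.lower():
--             preferred.append(k)
--     # Finally, all keys as a last resort (keeps function total)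
--     for k in keys:
--         if k not in preferred:
--             preferred.append(k)
--     return preferred
-- ===== SOURCE B (Python) =====
-- def _candidate_id_fields(rows):
--     if not rows:
--         return []
--
--     def rank(k):
--         lk = k.lower()
--         if lk.strip() in ("unique id", "unique_id", "_id", "id", "uid"):
--             return 0
--         if "id" in lk:
--             return 1
--         return 2
--
--     return sorted(rows[0].keys(), key=rank)
-- ===== Notes on version B (the rewrite author's own statement) =====
-- stated objective: idiomatic
-- what changed: Replaces A's three sequential membership-checked filtering passes over the keys with a single stable sort under a three-tier rank function (exact-name tier 0, contains-'id' tier 1, rest tier 2), relying on sort stability to preserve within-tier order.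
import Mathlib
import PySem

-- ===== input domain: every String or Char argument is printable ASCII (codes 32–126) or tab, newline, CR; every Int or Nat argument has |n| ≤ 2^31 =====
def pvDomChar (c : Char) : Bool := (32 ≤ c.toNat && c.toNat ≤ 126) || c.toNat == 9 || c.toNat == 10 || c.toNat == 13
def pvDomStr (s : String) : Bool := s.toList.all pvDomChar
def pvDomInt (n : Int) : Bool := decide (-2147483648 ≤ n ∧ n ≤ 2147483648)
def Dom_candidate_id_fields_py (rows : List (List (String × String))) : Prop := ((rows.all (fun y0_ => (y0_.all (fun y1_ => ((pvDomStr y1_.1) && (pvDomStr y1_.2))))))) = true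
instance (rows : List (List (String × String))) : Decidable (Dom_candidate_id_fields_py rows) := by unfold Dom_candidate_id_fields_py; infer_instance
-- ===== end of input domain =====

-- B replaces A's three sequential membership-checked passes over the keys by a single
-- stable sort under a three-tier rank function (idiomatic; same exact result).

-- ===== PORT A =====
def candidate_id_fields_py (rows : List (List (String × String))) : List String :=
  match rows with
  | [] => []
  | row :: _ =>
    let keys := (PySem.Dict.ofList row).keys
    -- Strong candidates first
    let preferred := keys.foldl (fun acc k =>
      let lk := PySem.Str.strip (PySem.Str.lower k)
      if lk = "unique id" ∨ lk = "unique_id" ∨ lk = "_id" ∨ lk = "id" ∨ lk = "uid"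
      then acc ++ [k] else acc) []
    -- Then anything containing id
    let preferred := keys.foldl (fun acc k =>
      if k ∉ acc ∧ PySem.Str.isIn "id" (PySem.Str.lower k) = true
      then acc ++ [k] else acc) preferred
    -- Finally, all keys as a last resort
    let preferred := keys.foldl (fun acc k =>
      if k ∉ acc then acc ++ [k] else acc) preferred
    preferred

-- ===== PORT B =====
def pvRank (k : String) : Int :=
  let lk := PySem.Str.lower k
  if PySem.Str.strip lk ∈ (["unique id", "unique_id", "_id", "id", "uid"] : List String) then 0
  else if PySem.Str.isIn "id" lk = true then 1
  else 2

def candidate_id_fields_py_alt (rows : List (List (String × String))) : List String :=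
  match rows with
  | [] => []
  | row :: _ => PySem.List.sorted ((PySem.Dict.ofList row).keys) pvRank

-- ===== PRECONDITION & SPEC =====
def Spec_candidate_id_fields_py (rows : List (List (String × String))) (out : List String) : Prop := out = candidate_id_fields_py_alt rows
instance (rows : List (List (String × String))) (out : List String) : Decidable (Spec_candidate_id_fields_py rows out) := by unfold Spec_candidate_id_fields_py; infer_instance

-- ===== CLAIM (what is proved, stated in full; the proofs are below) =====
def Claim_equal_candidate_id_fields_py : Prop := ∀ (rows : List (List (String × String))), Dom_candidate_id_fields_py rows → Spec_candidate_id_fields_py rows (candidate_id_fields_py rows)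

-- ===== LEMMAS AND PROOFS =====

-- Boolean forms of A's three tier tests, used only by the proofs
def pvF0 (k : String) : Bool :=
  decide (PySem.Str.strip (PySem.Str.lower k) = "unique id" ∨ PySem.Str.strip (PySem.Str.lower k) = "unique_id" ∨
          PySem.Str.strip (PySem.Str.lower k) = "_id" ∨ PySem.Str.strip (PySem.Str.lower k) = "id" ∨
          PySem.Str.strip (PySem.Str.lower k) = "uid")
def pvH1 (k : String) : Bool := PySem.Str.isIn "id" (PySem.Str.lower k)

lemma pvRank_eq (k : String) :
    pvRank k = if pvF0 k then 0 else if pvH1 k then 1 else 2 := by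
  simp only [pvRank, pvF0, pvH1, List.mem_cons, List.not_mem_nil, or_false]
  split_ifs <;> simp_all

lemma pvRank_cases (k : String) : pvRank k = 0 ∨ pvRank k = 1 ∨ pvRank k = 2 := by
  rw [pvRank_eq]; split_ifs <;> simp

-- insertBy helpers
lemma insertBy_all_true {α : Type} (before : α → α → Bool) (x : α) (l : List α)
    (h : ∀ y ∈ l, before x y = true) : PySem.List.insertBy before x l = x :: l := by
  cases l with
  | nil => rfl
  | cons y ys => simp [PySem.List.insertBy, h y (by simp)]

lemma insertBy_append_false {α : Type} (before : α → α → Bool) (x : α) (l1 l2 : List α)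
    (h : ∀ y ∈ l1, before x y = false) :
    PySem.List.insertBy before x (l1 ++ l2) = l1 ++ PySem.List.insertBy before x l2 := by
  induction l1 with
  | nil => simp
  | cons y ys ih =>
    simp only [List.cons_append, PySem.List.insertBy, h y (by simp)]
    simp [ih (fun z hz => h z (by simp [hz]))]

-- a stable sort by a key with values among {0,1,2} is the three buckets in order
lemma sorted_three {α : Type} (xs : List α) (key : α → Int)
    (h : ∀ x, key x = 0 ∨ key x = 1 ∨ key x = 2) :
    PySem.List.sorted xs key =
      xs.filter (fun x => decide (key x = 0)) ++ xs.filter (fun x => decide (key x = 1)) ++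
        xs.filter (fun x => decide (key x = 2)) := by
  rw [PySem.List.sorted_eq_foldl_insertBy]
  induction xs using List.reverseRecOn with
  | nil => simp
  | append_singleton xs x ih =>
    rw [List.foldl_append, List.foldl_cons, List.foldl_nil, ih]
    set b0 := xs.filter (fun x => decide (key x = 0)) with hb0
    set b1 := xs.filter (fun x => decide (key x = 1)) with hb1
    set b2 := xs.filter (fun x => decide (key x = 2)) with hb2
    have m0 : ∀ y ∈ b0, key y = 0 := fun y hy => by
      have := List.of_mem_filter hy; simpa using this
    have m1 : ∀ y ∈ b1, key y = 1 := fun y hy => by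
      have := List.of_mem_filter hy; simpa using this
    have m2 : ∀ y ∈ b2, key y = 2 := fun y hy => by
      have := List.of_mem_filter hy; simpa using this
    rcases h x with hx | hx | hx
    · rw [List.append_assoc,
        insertBy_append_false _ _ b0 _ (fun y hy => by simp [m0 y hy, hx]),
        insertBy_all_true _ _ _ (fun y hy => by
          rcases List.mem_append.1 hy with hy | hy
          · simp [m1 y hy, hx]
          · simp [m2 y hy, hx])]
      simp [List.filter_append, hx, ← hb0, ← hb1, ← hb2]
    · rw [List.append_assoc,
        insertBy_append_false _ _ b0 _ (fun y hy => by simp [m0 y hy, hx]),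
        insertBy_append_false _ _ b1 _ (fun y hy => by simp [m1 y hy, hx]),
        insertBy_all_true _ _ _ (fun y hy => by simp [m2 y hy, hx])]
      simp [List.filter_append, hx, ← hb0, ← hb1, ← hb2]
    · rw [PySem.List.insertBy_of_forall_not_before _ _ _ (fun y hy => by
        rcases List.mem_append.1 hy with hy | hy
        · rcases List.mem_append.1 hy with hy | hy
          · simp [m0 y hy, hx]
          · simp [m1 y hy, hx]
        · simp [m2 y hy, hx])]
      simp [List.filter_append, hx, ← hb0, ← hb1, ← hb2]

-- A's first pass is a plain filter
lemma passA1 (xs acc0 : List String) :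
    xs.foldl (fun acc k =>
      let lk := PySem.Str.strip (PySem.Str.lower k)
      if lk = "unique id" ∨ lk = "unique_id" ∨ lk = "_id" ∨ lk = "id" ∨ lk = "uid"
      then acc ++ [k] else acc) acc0
    = acc0 ++ xs.filter pvF0 := by
  induction xs generalizing acc0 with
  | nil => simp
  | cons k ks ih =>
    simp only [List.foldl_cons, List.filter_cons]
    by_cases h : PySem.Str.strip (PySem.Str.lower k) = "unique id" ∨ PySem.Str.strip (PySem.Str.lower k) = "unique_id" ∨
        PySem.Str.strip (PySem.Str.lower k) = "_id" ∨ PySem.Str.strip (PySem.Str.lower k) = "id" ∨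
        PySem.Str.strip (PySem.Str.lower k) = "uid"
    · simp only [ih, pvF0, h, decide_true]
      simp
    · simp only [ih, pvF0, h, decide_false]
      simp

-- A's second pass, for a nodup xs whose membership in acc0 is characterised by p
lemma passA2 (p : String → Bool) :
    ∀ (xs acc0 : List String), xs.Nodup → (∀ k ∈ xs, (k ∈ acc0 ↔ p k = true)) →
    xs.foldl (fun acc k =>
      if k ∉ acc ∧ PySem.Str.isIn "id" (PySem.Str.lower k) = true
      then acc ++ [k] else acc) acc0
    = acc0 ++ xs.filter (fun k => !p k && pvH1 k) := by
  intro xs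
  induction xs with
  | nil => simp
  | cons k ks ih =>
    intro acc0 hnd hm
    have hk := hm k (by simp)
    have hknotin : k ∉ ks := (List.nodup_cons.1 hnd).1
    have hnd' : ks.Nodup := (List.nodup_cons.1 hnd).2
    simp only [List.foldl_cons, List.filter_cons]
    by_cases hp : p k = true
    · have hin : k ∈ acc0 := hk.2 hp
      rw [if_neg (by simp [hin])]
      rw [ih acc0 hnd' (fun k' hk' => hm k' (by simp [hk']))]
      simp [hp]
    · have hnin : k ∉ acc0 := fun h => hp (hk.1 h)
      by_cases hh : pvH1 k = true
      · rw [if_pos ⟨hnin, hh⟩]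
        rw [ih (acc0 ++ [k]) hnd' (fun k' hk' => by
          have hne : k' ≠ k := fun he => hknotin (he ▸ hk')
          simp only [List.mem_append, List.mem_singleton, hne, or_false]
          exact hm k' (by simp [hk']))]
        simp [hp, hh]
      · rw [if_neg (by
          intro hc
          exact hh hc.2)]
        rw [ih acc0 hnd' (fun k' hk' => hm k' (by simp [hk']))]
        simp only [Bool.not_eq_true] at hh
        simp [hp, pvH1] at hh ⊢
        simp [hh]
-- A's third pass, same shape without the "id" test
lemma passA3 (p : String → Bool) :
    ∀ (xs acc0 : List String), xs.Nodup → (∀ k ∈ xs, (k ∈ acc0 ↔ p k = true)) →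
    xs.foldl (fun acc k => if k ∉ acc then acc ++ [k] else acc) acc0
    = acc0 ++ xs.filter (fun k => !p k) := by
  intro xs
  induction xs with
  | nil => simp
  | cons k ks ih =>
    intro acc0 hnd hm
    have hk := hm k (by simp)
    have hknotin : k ∉ ks := (List.nodup_cons.1 hnd).1
    have hnd' : ks.Nodup := (List.nodup_cons.1 hnd).2
    simp only [List.foldl_cons, List.filter_cons]
    by_cases hp : p k = true
    · have hin : k ∈ acc0 := hk.2 hp
      rw [if_neg (by simp [hin])]
      rw [ih acc0 hnd' (fun k' hk' => hm k' (by simp [hk']))]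
      simp [hp]
    · have hnin : k ∉ acc0 := fun h => hp (hk.1 h)
      rw [if_pos hnin]
      rw [ih (acc0 ++ [k]) hnd' (fun k' hk' => by
        have hne : k' ≠ k := fun he => hknotin (he ▸ hk')
        simp only [List.mem_append, List.mem_singleton, hne, or_false]
        exact hm k' (by simp [hk']))]
      simp [hp]

-- pointwise identification of the rank buckets with A's tier tests
lemma rank0_eq (k : String) : decide (pvRank k = 0) = pvF0 k := by
  rw [pvRank_eq]; cases hf : pvF0 k <;> cases hh : pvH1 k <;> simp_all
lemma rank1_eq (k : String) : decide (pvRank k = 1) = (!pvF0 k && pvH1 k) := by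
  rw [pvRank_eq]; cases hf : pvF0 k <;> cases hh : pvH1 k <;> simp_all
lemma rank2_eq (k : String) : decide (pvRank k = 2) = !(pvF0 k || pvH1 k) := by
  rw [pvRank_eq]; cases hf : pvF0 k <;> cases hh : pvH1 k <;> simp_all

-- ===== VERDICT (by name: the statement is the Claim_ definition above) =====
theorem candidate_id_fields_py_spec : Claim_equal_candidate_id_fields_py := by
  intro rows _
  unfold Spec_candidate_id_fields_py
  match rows with
  | [] => rfl
  | row :: rest =>
    simp only [candidate_id_fields_py, candidate_id_fields_py_alt]
    set keys := (PySem.Dict.ofList row).keys with hkeys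
    have hnd : keys.Nodup := PySem.Dict.nodup_keys_ofList row
    rw [passA1]
    rw [passA2 pvF0 keys _ hnd (fun k hk => by simp [List.mem_filter, hk])]
    rw [passA3 (fun k => pvF0 k || pvH1 k) keys _ hnd (fun k hk => by
      simp only [List.nil_append, List.mem_append, List.mem_filter]
      cases hf : pvF0 k <;> cases hh : pvH1 k <;> simp [hk])]
    rw [sorted_three keys pvRank pvRank_cases,
      List.filter_congr (l := keys) (fun k _ => rank0_eq k),
      List.filter_congr (l := keys) (fun k _ => rank1_eq k),
      List.filter_congr (l := keys) (fun k _ => rank2_eq k)]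
    simp [List.append_assoc]
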